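-- pv_equiv track=rewrite | github.com/AhmedYasser97/Data-science | realRecommender.py | findMostSolvedTag
-- ===== SOURCE A (Python) =====
-- def findMostSolvedTag(user_problem_tags_notRep, user_problem_tags_rep):
-- 	numOfTimes = []
-- 	allMost = []
-- 	for tag in user_problem_tags_notRep:
-- 		count = user_problem_tags_rep.count(tag)
-- 		numOfTimes.append(count)
-- 	most = max(numOfTimes)
-- 	j = 0
-- 	for num in numOfTimes:
-- 		if num == most:
-- 			allMost.append(user_problem_tags_notRep[j])
-- 		j = j + 1
--
-- 	return allMost
-- ===== SOURCE B (Python) =====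
-- def findMostSolvedTag(user_problem_tags_notRep, user_problem_tags_rep):
-- 	counts = {}
-- 	for t in user_problem_tags_rep:
-- 		counts[t] = counts.get(t, 0) + 1
-- 	best = None
-- 	winners = []
-- 	for tag in user_problem_tags_notRep:
-- 		c = counts.get(tag, 0)
-- 		if best is None or c > best:
-- 			best = c
-- 			winners = [tag]
-- 		elif c == best:
-- 			winners.append(tag)
-- 	return winners
-- ===== Notes on version B (the rewrite author's own statement) =====
-- stated objective: faster
-- what changed: B pre-tallies the rep list into a hash-map counter once and then finds the winners in a single running-maximum pass over notRep (tracking best count and current winner list), replacing A's per-tag rep.count scans, materialised counts list, max() pass and index-tracked rescan.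
import Mathlib
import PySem

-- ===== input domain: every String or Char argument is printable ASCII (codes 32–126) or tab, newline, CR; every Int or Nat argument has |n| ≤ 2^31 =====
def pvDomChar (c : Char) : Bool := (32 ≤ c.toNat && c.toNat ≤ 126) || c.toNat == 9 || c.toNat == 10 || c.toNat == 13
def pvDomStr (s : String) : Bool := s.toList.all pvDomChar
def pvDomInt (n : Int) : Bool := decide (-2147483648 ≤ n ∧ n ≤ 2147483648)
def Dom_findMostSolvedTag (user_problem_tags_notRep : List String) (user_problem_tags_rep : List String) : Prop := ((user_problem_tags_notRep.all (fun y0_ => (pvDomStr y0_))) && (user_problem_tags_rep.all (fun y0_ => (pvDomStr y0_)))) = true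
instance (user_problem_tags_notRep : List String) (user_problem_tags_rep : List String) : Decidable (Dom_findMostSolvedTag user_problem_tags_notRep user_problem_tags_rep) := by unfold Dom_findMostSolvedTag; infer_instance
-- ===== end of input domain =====

-- B pre-tallies the rep list into a counter dict once and finds the winners in a single
-- running-maximum pass over notRep, replacing A's per-tag count scans, counts list, max() pass
-- and index-tracked rescan (objective: faster, O(n+m) instead of O(n*m)).

-- ===== PORT A =====
def findMostSolvedTag (user_problem_tags_notRep : List String) (user_problem_tags_rep : List String) : List String :=
  let numOfTimes : List Int :=
    user_problem_tags_notRep.foldl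
      (fun acc tag => acc ++ [((PySem.List.count user_problem_tags_rep tag : Nat) : Int)]) []
  match PySem.List.max? numOfTimes (fun x => x) with
  | none => []   -- unreachable under Pre_ (Python: max([]) raises ValueError)
  | some most =>
    (numOfTimes.foldl
      (fun (st : List String × Int) num =>
        (if num == most then
           match PySem.List.pyGet? user_problem_tags_notRep st.2 with
           | some x => st.1 ++ [x]
           | none => st.1
         else st.1, st.2 + 1)) ([], 0)).1

-- ===== PORT B =====
def findMostSolvedTag_alt (user_problem_tags_notRep : List String) (user_problem_tags_rep : List String) : List String :=
  let counts : PySem.Dict String Int :=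
    user_problem_tags_rep.foldl (fun d t => d.insert t (d.getD t 0 + 1)) PySem.Dict.empty
  (user_problem_tags_notRep.foldl
    (fun (st : Option Int × List String) tag =>
      let c := counts.getD tag 0
      match st.1 with
      | none => (some c, [tag])
      | some best =>
        if c > best then (some c, [tag])
        else if c == best then (some best, st.2 ++ [tag])
        else st)
    (none, [])).2

-- ===== PRECONDITION & SPEC =====
-- Pre_ excludes only the empty notRep list, on which A's max(numOfTimes) raises ValueError.
def Pre_findMostSolvedTag (user_problem_tags_notRep : List String) (user_problem_tags_rep : List String) : Prop :=
  user_problem_tags_notRep ≠ []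
instance (user_problem_tags_notRep : List String) (user_problem_tags_rep : List String) : Decidable (Pre_findMostSolvedTag user_problem_tags_notRep user_problem_tags_rep) := by unfold Pre_findMostSolvedTag; infer_instance

def pvWitness_findMostSolvedTag : List String × List String := (["a", "b", "a"], ["a", "b", "b", "b"])

def Spec_findMostSolvedTag (user_problem_tags_notRep : List String) (user_problem_tags_rep : List String) (out : List String) : Prop := out = findMostSolvedTag_alt user_problem_tags_notRep user_problem_tags_rep
instance (user_problem_tags_notRep : List String) (user_problem_tags_rep : List String) (out : List String) : Decidable (Spec_findMostSolvedTag user_problem_tags_notRep user_problem_tags_rep out) := by unfold Spec_findMostSolvedTag; infer_instance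

-- ===== CLAIM (what is proved, stated in full; the proofs are below) =====
def Claim_equal_findMostSolvedTag : Prop := ∀ (user_problem_tags_notRep : List String) (user_problem_tags_rep : List String), Dom_findMostSolvedTag user_problem_tags_notRep user_problem_tags_rep → Pre_findMostSolvedTag user_problem_tags_notRep user_problem_tags_rep → Spec_findMostSolvedTag user_problem_tags_notRep user_problem_tags_rep (findMostSolvedTag user_problem_tags_notRep user_problem_tags_rep)


-- ===== LEMMAS AND PROOFS =====

-- the count both programs use for a tag
def pvCnt (rep : List String) (t : String) : Int := ((PySem.List.count rep t : Nat) : Int)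

-- A's second loop (index-tracked rescan of the counts list) is a filter of notRep
lemma loopA (rep : List String) (nr : List String) (most : Int) :
    ∀ (l pre acc : List String), pre ++ l = nr →
    ((l.map (pvCnt rep)).foldl
      (fun (st : List String × Int) num =>
        (if num == most then
           match PySem.List.pyGet? nr st.2 with
           | some x => st.1 ++ [x]
           | none => st.1
         else st.1, st.2 + 1)) (acc, (pre.length : Int))).1
      = acc ++ l.filter (fun t => pvCnt rep t == most) := by
  intro l
  induction l with
  | nil => intro pre acc _; simp
  | cons t l ih =>
    intro pre acc hpre
    have hget : PySem.List.pyGet? nr (pre.length : Int) = some t := by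
      rw [← hpre, PySem.List.pyGet?_natCast]
      simp
    simp only [List.map_cons, List.foldl_cons, hget]
    have hlen : ((pre.length : Int) + 1) = ((pre ++ [t]).length : Int) := by
      push_cast [List.length_append, List.length_cons, List.length_nil]; ring
    by_cases hc : pvCnt rep t == most
    · rw [if_pos hc, hlen, ih (pre ++ [t]) (acc ++ [t]) (by simp [← hpre])]
      simp [hc]
    · rw [if_neg (by simpa using hc), hlen, ih (pre ++ [t]) acc (by simp [← hpre])]
      simp [hc]

-- B's running-maximum loop, started at a known best, yields the max and the filter of the rest
lemma loopB (cnt : String → Int) (l : List String) :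
    ∀ (b : Int) (w : List String),
    (l.foldl
      (fun (st : Option Int × List String) tag =>
        match st.1 with
        | none => (some (cnt tag), [tag])
        | some best =>
          if cnt tag > best then (some (cnt tag), [tag])
          else if cnt tag == best then (some best, st.2 ++ [tag])
          else st)
      (some b, w))
    = (some ((l.map cnt).foldl max b),
       (if (l.map cnt).foldl max b == b then w else [])
         ++ l.filter (fun t => cnt t == (l.map cnt).foldl max b)) := by
  induction l with
  | nil => intro b w; simp
  | cons t l ih =>
    intro b w
    simp only [List.foldl_cons, List.map_cons]
    rcases lt_trichotomy b (cnt t) with h | h | h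
    · rw [if_pos (show cnt t > b from h)]
      rw [ih (cnt t) [t]]
      have hmax : max b (cnt t) = cnt t := max_eq_right h.le
      have hM : cnt t ≤ (l.map cnt).foldl max (cnt t) := (PySem.List.le_foldl_max _ _).1
      simp only [hmax]
      have hb : ¬ ((l.map cnt).foldl max (cnt t) == b) := by
        simp only [beq_iff_eq]; omega
      rw [if_neg hb]
      by_cases ht : (l.map cnt).foldl max (cnt t) == cnt t
      · have : (cnt t == (l.map cnt).foldl max (cnt t)) := by
          simp only [beq_iff_eq] at ht ⊢; omega
        simp [this, ht]
      · have : ¬ (cnt t == (l.map cnt).foldl max (cnt t)) := by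
          simp only [beq_iff_eq] at ht ⊢; omega
        simp [this, ht]
    · rw [if_neg (show ¬ (cnt t > b) from by omega), if_pos (show (cnt t == b) = true from by simp only [beq_iff_eq]; omega)]
      rw [ih b (w ++ [t])]
      have hmax : max b (cnt t) = b := max_eq_left h.ge
      simp only [hmax]
      by_cases hb : (l.map cnt).foldl max b == b
      · have : (cnt t == (l.map cnt).foldl max b) := by
          simp only [beq_iff_eq] at hb ⊢; omega
        simp [this, hb]
      · have : ¬ (cnt t == (l.map cnt).foldl max b) := by
          simp only [beq_iff_eq] at hb ⊢; omega
        simp [this, hb]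
    · rw [if_neg (show ¬ (cnt t > b) from by omega), if_neg (show ¬ ((cnt t == b) = true) from by simp only [beq_iff_eq]; omega)]
      rw [ih b w]
      have hmax : max b (cnt t) = b := max_eq_left h.le
      simp only [hmax]
      have hbM : b ≤ (l.map cnt).foldl max b := (PySem.List.le_foldl_max _ _).1
      have : ¬ (cnt t == (l.map cnt).foldl max b) := by
        simp only [beq_iff_eq]; omega
      simp [this]

-- ===== VERDICT (by name: the statement is the Claim_ definition above) =====
theorem findMostSolvedTag_spec : Claim_equal_findMostSolvedTag := by
  intro nr rep _ hpre
  unfold Spec_findMostSolvedTag findMostSolvedTag findMostSolvedTag_alt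
  simp only [PySem.List.foldl_append_singleton_eq_map, List.nil_append,
             PySem.Dict.foldl_insert_getD_add_one_eq_counter]
  have hC : ∀ tag : String, (PySem.Dict.counter rep).getD tag 0
      = ((PySem.List.count rep tag : Nat) : Int) := by
    intro t
    rw [PySem.Dict.getD_counter]
    simp [PySem.List.count_eq]
  simp only [hC]
  cases nr with
  | nil => exact absurd rfl hpre
  | cons t0 rest =>
    simp only [List.map_cons, PySem.List.max?_id_cons]
    have hloopA := loopA rep (t0 :: rest)
      ((rest.map (fun x => ((PySem.List.count rep x : Nat) : Int))).foldl max
        ((PySem.List.count rep t0 : Nat) : Int))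
      (t0 :: rest) [] [] (by simp)
    simp only [show pvCnt rep = fun x => ((PySem.List.count rep x : Nat) : Int) from rfl,
      List.nil_append, List.map_cons, List.length_nil, Nat.cast_zero] at hloopA
    rw [hloopA]
    rw [List.foldl_cons]
    have hB := loopB (fun x => ((PySem.List.count rep x : Nat) : Int)) rest
      ((PySem.List.count rep t0 : Nat) : Int) [t0]
    rw [hB]
    by_cases ht : (rest.map (fun x => ((PySem.List.count rep x : Nat) : Int))).foldl max
        ((PySem.List.count rep t0 : Nat) : Int) = ((PySem.List.count rep t0 : Nat) : Int)
    · rw [if_pos (beq_iff_eq.mpr ht)]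
      simp only [PySem.List.count_eq] at ht
      simp [ht]
    · rw [if_neg (fun hh => ht (beq_iff_eq.mp hh))]
      simp only [PySem.List.count_eq] at ht
      simp [Ne.symm ht]
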